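-- pv_equiv track=rewrite | github.com/Floozutter/ktane-defusekit | defusekit/mods/complicatedwires.py | get_instruction
-- ===== SOURCE A (Python) =====
-- def get_instruction(red: bool, blue: bool, star: bool, led: bool) -> str:
--     binstr = "".join(["1" if b else "0" for b in (red, blue, star, led)])
--     wirestate = int(binstr, 2)
--     C = "Cut the wire"
--     D = "Do not cut the wire"
--     S = "Cut the wire if serial number's last digit is even"
--     P = "Cut the wire if the bomb has a parallel port"
--     B = "Cut the wire if the bomb has 2 or more batteries"
--     INSTRUCTIONS = {
--         0b0000 : C,
--         0b0001 : D,
--         0b0010 : C,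
--         0b0011 : B,
--         0b0100 : S,
--         0b0101 : P,
--         0b0110 : D,
--         0b0111 : P,
--         0b1000 : S,
--         0b1001 : B,
--         0b1010 : C,
--         0b1011 : B,
--         0b1100 : S,
--         0b1101 : S,
--         0b1110 : P,
--         0b1111 : D
--         }
--     return INSTRUCTIONS[wirestate]
-- ===== SOURCE B (Python) =====
-- def get_instruction(red: bool, blue: bool, star: bool, led: bool) -> str:
--     C = "Cut the wire"
--     D = "Do not cut the wire"
--     S = "Cut the wire if serial number's last digit is even"
--     P = "Cut the wire if the bomb has a parallel port"
--     B = "Cut the wire if the bomb has 2 or more batteries"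
--     if red:
--         if blue:
--             if star:
--                 return D if led else P
--             return S
--         if star:
--             return B if led else C
--         return B if led else S
--     if blue:
--         if star:
--             return P if led else D
--         return P if led else S
--     if star:
--         return B if led else C
--     return D if led else C
-- ===== Notes on version B (the rewrite author's own statement) =====
-- stated objective: idiomatic
-- what changed: Replaced the binary-string encoding, int(s,2) parse and 16-entry dict lookup with a nested conditional decision tree branching directly on the four booleans, collapsing leaves that agree.
import Mathlib
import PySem

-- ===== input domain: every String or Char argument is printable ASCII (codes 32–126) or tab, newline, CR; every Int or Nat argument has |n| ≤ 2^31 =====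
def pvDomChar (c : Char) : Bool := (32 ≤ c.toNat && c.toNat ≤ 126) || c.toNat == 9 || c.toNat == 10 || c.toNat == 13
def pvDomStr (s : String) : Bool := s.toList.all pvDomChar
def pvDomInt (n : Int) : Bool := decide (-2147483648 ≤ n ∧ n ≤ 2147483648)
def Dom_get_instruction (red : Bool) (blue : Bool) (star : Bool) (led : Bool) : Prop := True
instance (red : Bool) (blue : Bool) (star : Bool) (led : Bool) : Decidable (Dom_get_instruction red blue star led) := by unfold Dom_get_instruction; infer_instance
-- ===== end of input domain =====

-- B replaces A's binary-string/int(s,2)/dict-lookup pipeline with a nested conditional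
-- decision tree on the four booleans (idiomatic; same behaviour on all 16 inputs).

-- ===== PORT A =====
-- int(binstr, 2): ported by hand as a fold acc*2 + bit over the digit characters,
-- exact for strings of '0'/'1' (which binstr always is).
def get_instruction (red : Bool) (blue : Bool) (star : Bool) (led : Bool) : String :=
  let binstr : String :=
    PySem.Str.join "" ([red, blue, star, led].map (fun b => if b then "1" else "0"))
  let wirestate : Int :=
    binstr.toList.foldl (fun acc c => acc * 2 + (if c = '1' then 1 else 0)) 0
  let C := "Cut the wire"
  let D := "Do not cut the wire"
  let S := "Cut the wire if serial number's last digit is even"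
  let P := "Cut the wire if the bomb has a parallel port"
  let B := "Cut the wire if the bomb has 2 or more batteries"
  let INSTRUCTIONS : PySem.Dict Int String := PySem.Dict.ofList
    [(0, C), (1, D), (2, C), (3, B), (4, S), (5, P), (6, D), (7, P),
     (8, S), (9, B), (10, C), (11, B), (12, S), (13, S), (14, P), (15, D)]
  (INSTRUCTIONS.get? wirestate).getD ""   -- key always present; KeyError unreachable

-- ===== PORT B =====
def get_instruction_alt (red : Bool) (blue : Bool) (star : Bool) (led : Bool) : String :=
  let C := "Cut the wire"
  let D := "Do not cut the wire"
  let S := "Cut the wire if serial number's last digit is even"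
  let P := "Cut the wire if the bomb has a parallel port"
  let B := "Cut the wire if the bomb has 2 or more batteries"
  if red then
    if blue then
      (if star then (if led then D else P) else S)
    else
      if star then (if led then B else C)
      else (if led then B else S)
  else
    if blue then
      if star then (if led then P else D)
      else (if led then P else S)
    else
      if star then (if led then B else C)
      else (if led then D else C)

-- ===== PRECONDITION & SPEC =====
def Spec_get_instruction (red : Bool) (blue : Bool) (star : Bool) (led : Bool) (out : String) : Prop := out = get_instruction_alt red blue star led
instance (red : Bool) (blue : Bool) (star : Bool) (led : Bool) (out : String) : Decidable (Spec_get_instruction red blue star led out) := by unfold Spec_get_instruction; infer_instance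

-- ===== CLAIM (what is proved, stated in full; the proofs are below) =====
def Claim_equal_get_instruction : Prop := ∀ (red : Bool) (blue : Bool) (star : Bool) (led : Bool), Dom_get_instruction red blue star led → Spec_get_instruction red blue star led (get_instruction red blue star led)

-- ===== LEMMAS AND PROOFS =====

-- ===== VERDICT (by name: the statement is the Claim_ definition above) =====
theorem get_instruction_spec : Claim_equal_get_instruction := by
  unfold Claim_equal_get_instruction
  intro red blue star led _
  cases red <;> cases blue <;> cases star <;> cases led <;> decide
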